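-- pv_equiv track=rewrite | github.com/colivarese/Discovery-of-Multiple-Level-Association-Rules-from-Large-Databases- | MLAR/fun.py | get_large_1_itemsets
-- ===== SOURCE A (Python) =====
-- def get_large_1_itemsets(trans_table:list, l:int) -> dict:
--     items = []
--     for row in trans_table:
--         for item in row:
--             if item[0:l] not in items:
--                 items.append(item[0:l])
--     items = {k:0 for k in items}
--     for i, row in enumerate(trans_table):
--         items_in_row = []
--         for item in row:
--             items_in_row.append(str(item[0:l]))
--         items_keys = list(items.keys())
--         for item in items_keys:
--             if item in items_in_row:
--                 items[item] += 1
--     return items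
-- ===== SOURCE B (Python) =====
-- def get_large_1_itemsets(trans_table: list, l: int) -> dict:
--     # Single pass: per-row seen-set; counts dict built incrementally.
--     counts = {}
--     for row in trans_table:
--         seen = set()
--         for item in row:
--             p = item[0:l]
--             if p not in seen:
--                 seen.add(p)
--                 counts[p] = counts.get(p, 0) + 1
--     return counts
-- ===== Notes on version B (the rewrite author's own statement) =====
-- stated objective: faster
-- what changed: Replaces A's two full passes (distinct-prefix list built with a linear membership scan, then per row a scan over all keys with a linear 'in' test) by a single pass that keeps a per-row seen-set and one counts dict updated in place.
import Mathlib
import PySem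

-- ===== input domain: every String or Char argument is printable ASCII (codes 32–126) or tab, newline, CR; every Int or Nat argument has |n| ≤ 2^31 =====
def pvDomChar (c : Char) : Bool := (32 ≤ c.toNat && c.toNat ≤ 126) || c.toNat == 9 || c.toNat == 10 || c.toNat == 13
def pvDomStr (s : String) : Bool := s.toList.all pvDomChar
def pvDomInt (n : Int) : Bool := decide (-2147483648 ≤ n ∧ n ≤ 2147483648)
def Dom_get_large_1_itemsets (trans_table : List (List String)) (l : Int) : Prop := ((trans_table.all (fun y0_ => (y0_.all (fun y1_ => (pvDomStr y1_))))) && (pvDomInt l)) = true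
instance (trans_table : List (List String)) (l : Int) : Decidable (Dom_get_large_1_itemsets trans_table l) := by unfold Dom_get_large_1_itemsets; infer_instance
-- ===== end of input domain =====

-- B replaces A's two full passes (distinct-prefix list with linear membership scans, then a
-- per-row scan over all keys) by one pass with a per-row seen-set and an incrementally built
-- counts dict; same return value (a dict, ported as an association list in insertion order).

-- ===== PORT A =====
def get_large_1_itemsets (trans_table : List (List String)) (l : Int) : List (String × Int) :=
  -- items = []; for row: for item: if item[0:l] not in items: items.append(item[0:l])
  let items : List String :=
    trans_table.foldl (fun acc row =>
      row.foldl (fun acc item =>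
        if PySem.Str.slice item (some 0) (some l) ∈ acc then acc
        else acc ++ [PySem.Str.slice item (some 0) (some l)]) acc) []
  -- items = {k:0 for k in items}
  let d0 : PySem.Dict String Int := items.foldl (fun d k => d.insert k 0) PySem.Dict.empty
  -- for i, row in enumerate(trans_table): … (the index i is unused by the body)
  let d1 : PySem.Dict String Int :=
    (PySem.List.enumerate trans_table 0).foldl (fun d p =>
      let row := p.2
      -- items_in_row built by appending str(item[0:l]) (str() on a str is the identity)
      let items_in_row : List String :=
        row.foldl (fun acc item => acc ++ [PySem.Str.slice item (some 0) (some l)]) []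
      let items_keys := d.keys
      items_keys.foldl (fun d' k => if k ∈ items_in_row then d'.modify k 0 (· + 1) else d') d) d0
  d1.items

-- ===== PORT B =====
def get_large_1_itemsets_alt (trans_table : List (List String)) (l : Int) : List (String × Int) :=
  (trans_table.foldl (fun counts row =>
      (row.foldl (fun (st : PySem.Set String × PySem.Dict String Int) item =>
          let p := PySem.Str.slice item (some 0) (some l)
          if PySem.Set.contains st.1 p then st
          else (PySem.Set.add st.1 p, st.2.insert p (st.2.getD p 0 + 1)))
        (PySem.Set.empty, counts)).2)
    PySem.Dict.empty).items

-- ===== PRECONDITION & SPEC =====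
def Spec_get_large_1_itemsets (trans_table : List (List String)) (l : Int) (out : List (String × Int)) : Prop := out = get_large_1_itemsets_alt trans_table l
instance (trans_table : List (List String)) (l : Int) (out : List (String × Int)) : Decidable (Spec_get_large_1_itemsets trans_table l out) := by unfold Spec_get_large_1_itemsets; infer_instance

-- ===== CLAIM (what is proved, stated in full; the proofs are below) =====
def Claim_equal_get_large_1_itemsets : Prop := ∀ (trans_table : List (List String)) (l : Int), Dom_get_large_1_itemsets trans_table l → Spec_get_large_1_itemsets trans_table l (get_large_1_itemsets trans_table l)

-- ===== LEMMAS AND PROOFS =====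

-- the prefix item[0:l] both programs key on
def pvPre (l : Int) (item : String) : String := PySem.Str.slice item (some 0) (some l)

-- the distinct prefixes in first-seen order (A's first loop)
def pvKeys (l : Int) (T : List (List String)) : List String :=
  T.foldl (fun s row => row.foldl (fun s item => PySem.Set.add s (pvPre l item)) s) []

-- A's per-row body (second loop) and B's per-row body, as named step functions
def pvStepA (l : Int) (d : PySem.Dict String Int) (row : List String) : PySem.Dict String Int :=
  let items_in_row : List String :=
    row.foldl (fun acc item => acc ++ [PySem.Str.slice item (some 0) (some l)]) []
  (d.keys).foldl (fun d' k => if k ∈ items_in_row then d'.modify k 0 (· + 1) else d') d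

def pvUpd (d : PySem.Dict String Int) (p : String) : PySem.Dict String Int :=
  d.insert p (d.getD p 0 + 1)

def pvStepB (l : Int) (counts : PySem.Dict String Int) (row : List String) : PySem.Dict String Int :=
  (row.foldl (fun (st : PySem.Set String × PySem.Dict String Int) item =>
      if PySem.Set.contains st.1 (pvPre l item) then st
      else (PySem.Set.add st.1 (pvPre l item),
            st.2.insert (pvPre l item) (st.2.getD (pvPre l item) 0 + 1)))
    (PySem.Set.empty, counts)).2

-- ---- facts about PySem.Set.update specific to this file ----
lemma pvUpdate_cons (s : PySem.Set String) (x : String) (xs : List String) :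
    PySem.Set.update s (x :: xs) = PySem.Set.update (s.add x) xs := by
  simp [PySem.Set.update]

lemma pvUpdate_append (s : PySem.Set String) (a b : List String) :
    PySem.Set.update s (a ++ b) = PySem.Set.update (PySem.Set.update s a) b := by
  simp [PySem.Set.update, List.foldl_append]

lemma pvUpdate_subset (t : List String) : ∀ (s : PySem.Set String), (∀ y ∈ t, y ∈ s) →
    PySem.Set.update s t = s := by
  induction t with
  | nil => intro s _; simp [PySem.Set.update]
  | cons x xs ih =>
    intro s h
    rw [pvUpdate_cons, PySem.Set.add_of_mem (h x (by simp))]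
    exact ih s (fun y hy => h y (by simp [hy]))

lemma pvUpdate_prefix (xs : List String) : ∀ (s : PySem.Set String),
    ∃ w, PySem.Set.update s xs = s ++ w := by
  induction xs with
  | nil => intro s; exact ⟨[], by simp [PySem.Set.update]⟩
  | cons x xs ih =>
    intro s
    rw [pvUpdate_cons]
    by_cases h : x ∈ s
    · rw [PySem.Set.add_of_mem h]; exact ih s
    · rw [PySem.Set.add_of_not_mem h]
      obtain ⟨w, hw⟩ := ih (s ++ [x])
      exact ⟨x :: w, by simp [hw]⟩

lemma pvUpdate_update (xs : List String) : ∀ (s t : PySem.Set String), (∀ y ∈ t, y ∈ s) →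
    PySem.Set.update s (PySem.Set.update t xs) = PySem.Set.update s xs := by
  induction xs with
  | nil =>
    intro s t h
    simpa [PySem.Set.update] using pvUpdate_subset t s h
  | cons x xs ih =>
    intro s t h
    rw [pvUpdate_cons, pvUpdate_cons]
    by_cases hx : x ∈ s
    · rw [PySem.Set.add_of_mem hx]
      by_cases hxt : x ∈ t
      · rw [PySem.Set.add_of_mem hxt]; exact ih s t h
      · rw [PySem.Set.add_of_not_mem hxt]
        refine ih s (t ++ [x]) ?_
        intro y hy
        rcases List.mem_append.1 hy with h1 | h1
        · exact h y h1
        · rw [List.mem_singleton.1 h1]; exact hx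
    · have hxt : x ∉ t := fun hc => hx (h x hc)
      rw [PySem.Set.add_of_not_mem hx, PySem.Set.add_of_not_mem hxt]
      obtain ⟨w, hw⟩ := pvUpdate_prefix xs (t ++ [x])
      have hsub : ∀ y ∈ t ++ [x], y ∈ s ++ [x] := by
        intro y hy
        rcases List.mem_append.1 hy with h1 | h1
        · exact List.mem_append.2 (Or.inl (h y h1))
        · exact List.mem_append.2 (Or.inr h1)
      calc PySem.Set.update s (PySem.Set.update (t ++ [x]) xs)
          = PySem.Set.update s ((t ++ [x]) ++ w) := by rw [hw]
        _ = PySem.Set.update (PySem.Set.update s (t ++ [x])) w := pvUpdate_append _ _ _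
        _ = PySem.Set.update (s ++ [x]) w := by
              rw [pvUpdate_append, pvUpdate_subset t s h]
              simp [PySem.Set.update, PySem.Set.add_of_not_mem hx]
        _ = PySem.Set.update (s ++ [x]) ((t ++ [x]) ++ w) := by
              rw [pvUpdate_append, pvUpdate_subset (t ++ [x]) (s ++ [x]) hsub]
        _ = PySem.Set.update (s ++ [x]) (PySem.Set.update (t ++ [x]) xs) := by rw [hw]
        _ = PySem.Set.update (s ++ [x]) xs := ih (s ++ [x]) (t ++ [x]) hsub

lemma pvUpdate_ofList (s : PySem.Set String) (xs : List String) :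
    PySem.Set.update s (PySem.Set.ofList xs) = PySem.Set.update s xs := by
  have h : PySem.Set.ofList xs = PySem.Set.update [] xs := by
    simp [PySem.Set.ofList_eq_foldl, PySem.Set.update]
  rw [h]
  exact pvUpdate_update xs s [] (by simp)

lemma pvUpdate_fresh (xs : List String) : ∀ (s : PySem.Set String),
    (∀ x ∈ xs, x ∉ s) → xs.Nodup → PySem.Set.update s xs = s ++ xs := by
  induction xs with
  | nil => intro s _ _; simp [PySem.Set.update]
  | cons x xs ih =>
    intro s h hn
    rw [pvUpdate_cons, PySem.Set.add_of_not_mem (h x (by simp))]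
    rw [ih (s ++ [x]) ?_ (List.nodup_cons.1 hn).2]
    · simp
    · intro y hy
      simp only [List.mem_append, List.mem_singleton]
      rintro (h1 | h1)
      · exact h y (by simp [hy]) h1
      · exact (List.nodup_cons.1 hn).1 (h1 ▸ hy)

-- ---- pvKeys is duplicate-free ----
lemma pvNodup_fold_add (l : Int) (row : List String) : ∀ (s : PySem.Set String), s.Nodup →
    (row.foldl (fun s item => PySem.Set.add s (pvPre l item)) s).Nodup := by
  induction row with
  | nil => intro s hs; simpa using hs
  | cons x xs ih => intro s hs; exact ih _ (PySem.Set.nodup_add _ _ hs)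

lemma pvKeys_nodup (l : Int) (T : List (List String)) : (pvKeys l T).Nodup := by
  unfold pvKeys
  suffices h : ∀ (s : PySem.Set String), s.Nodup →
      (T.foldl (fun s row => row.foldl (fun s item => PySem.Set.add s (pvPre l item)) s) s).Nodup by
    exact h [] (by simp)
  induction T with
  | nil => intro s hs; simpa using hs
  | cons r rs ih => intro s hs; exact ih _ (pvNodup_fold_add l r s hs)

-- ---- A's initial dict {k:0 for k in items} ----
lemma pvGetD_insert0 (xs : List String) : ∀ (d : PySem.Dict String Int),
    (∀ v, d.getD v 0 = 0) → ∀ v, (xs.foldl (fun d k => d.insert k 0) d).getD v 0 = 0 := by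
  induction xs with
  | nil => intro d h v; simpa using h v
  | cons x xs ih =>
    intro d h v
    refine ih _ (fun w => ?_) v
    rw [PySem.Dict.getD_insert]
    split <;> simp [h]

-- ---- A's second loop, one row ----
lemma pvStepA_filter (l : Int) (d : PySem.Dict String Int) (row : List String) :
    pvStepA l d row =
      ((d.keys).filter (fun k => decide (k ∈ row.map (pvPre l)))).foldl
        (fun d' k => d'.modify k 0 (· + 1)) d := by
  unfold pvStepA
  rw [PySem.List.foldl_append_singleton_eq_map]
  simp only [List.nil_append]
  exact PySem.List.foldl_ite_eq_foldl_filter (fun k => k ∈ row.map (pvPre l)) _ _ _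

lemma pvStepA_keys (l : Int) (d : PySem.Dict String Int) (row : List String) :
    (pvStepA l d row).keys = d.keys := by
  rw [pvStepA_filter]
  rw [PySem.Dict.keys_foldl_modify _ 0 (fun _ _ v => v + 1)]
  exact pvUpdate_subset _ _ (fun y hy => (List.mem_filter.1 hy).1)

lemma pvStepA_getD (l : Int) (d : PySem.Dict String Int) (row : List String)
    (hnd : d.keys.Nodup) (v : String) :
    (pvStepA l d row).getD v 0 =
      d.getD v 0 + (if v ∈ d.keys ∧ v ∈ row.map (pvPre l) then 1 else 0) := by
  rw [pvStepA_filter, PySem.Dict.getD_foldl_modify_add_one]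
  congr 1
  have hnf : ((d.keys).filter (fun k => decide (k ∈ row.map (pvPre l)))).Nodup :=
    hnd.filter _
  rw [hnf.count]
  simp [List.mem_filter]

-- ---- A's second loop, all rows ----
lemma pvA_run (l : Int) (rows : List (List String)) : ∀ (d : PySem.Dict String Int),
    d.keys.Nodup →
    (rows.foldl (pvStepA l) d).keys = d.keys ∧
    ∀ v ∈ d.keys, (rows.foldl (pvStepA l) d).getD v 0 =
      d.getD v 0 + (rows.countP (fun row => decide (v ∈ row.map (pvPre l))) : Int) := by
  induction rows with
  | nil => intro d hnd; simp
  | cons row rest ih =>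
    intro d hnd
    have hk := pvStepA_keys l d row
    obtain ⟨ihk, ihg⟩ := ih (pvStepA l d row) (hk ▸ hnd)
    constructor
    · simpa [hk] using ihk
    · intro v hv
      rw [List.foldl_cons, ihg v (hk ▸ hv), pvStepA_getD l d row hnd v, List.countP_cons]
      have : (if v ∈ d.keys ∧ v ∈ row.map (pvPre l) then (1:Int) else 0) =
          (if decide (v ∈ row.map (pvPre l)) = true then (1:Int) else 0) := by
        by_cases h : v ∈ row.map (pvPre l) <;> simp [h, hv]
      rw [this]
      push_cast
      ring

-- ---- B's inner per-row fold with the seen-set ----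
lemma pvBrow (l : Int) (row : List String) : ∀ (s : PySem.Set String) (d : PySem.Dict String Int),
    row.foldl (fun (st : PySem.Set String × PySem.Dict String Int) item =>
        if PySem.Set.contains st.1 (pvPre l item) then st
        else (PySem.Set.add st.1 (pvPre l item),
              st.2.insert (pvPre l item) (st.2.getD (pvPre l item) 0 + 1))) (s, d)
    = (PySem.Set.update s (row.map (pvPre l)),
       ((PySem.Set.update s (row.map (pvPre l))).drop s.length).foldl pvUpd d) := by
  induction row with
  | nil => intro s d; simp [PySem.Set.update, List.drop_length]
  | cons item rest ih =>
    intro s d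
    rw [List.foldl_cons, List.map_cons, pvUpdate_cons]
    by_cases h : pvPre l item ∈ s
    · have hc : PySem.Set.contains s (pvPre l item) = true :=
        (PySem.Set.contains_iff s _).2 h
      simp only [hc, if_true, PySem.Set.add_of_mem h]
      exact ih s d
    · have hc : PySem.Set.contains s (pvPre l item) = false := by
        rw [Bool.eq_false_iff]
        intro hc'
        exact h ((PySem.Set.contains_iff s _).1 hc')
      simp only [hc, Bool.false_eq_true, if_false]
      rw [PySem.Set.add_of_not_mem h]
      rw [ih (s ++ [pvPre l item]) (d.insert (pvPre l item) (d.getD (pvPre l item) 0 + 1))]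
      obtain ⟨w, hw⟩ := pvUpdate_prefix (rest.map (pvPre l)) (s ++ [pvPre l item])
      have h1 : (PySem.Set.update (s ++ [pvPre l item]) (rest.map (pvPre l))).drop s.length
          = pvPre l item :: w := by
        rw [hw, List.append_assoc, List.singleton_append, List.drop_left]
      have h2 : (PySem.Set.update (s ++ [pvPre l item]) (rest.map (pvPre l))).drop (s ++ [pvPre l item]).length
          = w := by
        rw [hw, List.drop_left]
      rw [h1, h2, List.foldl_cons]
      rfl

lemma pvStepB_eq (l : Int) (d : PySem.Dict String Int) (row : List String) :
    pvStepB l d row = (PySem.Set.ofList (row.map (pvPre l))).foldl pvUpd d := by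
  unfold pvStepB
  rw [pvBrow]
  have h : PySem.Set.update ([] : PySem.Set String) (row.map (pvPre l))
      = PySem.Set.ofList (row.map (pvPre l)) := by
    simp [PySem.Set.update, PySem.Set.ofList_eq_foldl]
  simp [PySem.Set.empty, h]

lemma pvStepB_keys (l : Int) (d : PySem.Dict String Int) (row : List String) :
    (pvStepB l d row).keys = PySem.Set.update d.keys (row.map (pvPre l)) := by
  rw [pvStepB_eq]
  have h : (PySem.Set.ofList (row.map (pvPre l))).foldl pvUpd d
      = (PySem.Set.ofList (row.map (pvPre l))).foldl (fun d x => d.insert x (d.getD x 0 + 1)) d := rfl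
  rw [h, PySem.Dict.keys_foldl_insert _ (fun d x => d.getD x 0 + 1), pvUpdate_ofList]

lemma pvStepB_getD (l : Int) (d : PySem.Dict String Int) (row : List String) (v : String) :
    (pvStepB l d row).getD v 0 =
      d.getD v 0 + (if v ∈ row.map (pvPre l) then 1 else 0) := by
  rw [pvStepB_eq]
  have h : (PySem.Set.ofList (row.map (pvPre l))).foldl pvUpd d
      = (PySem.Set.ofList (row.map (pvPre l))).foldl (fun d x => d.insert x (d.getD x 0 + 1)) d := rfl
  rw [h, PySem.Dict.getD_foldl_insert_add_one]
  congr 1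
  rw [(PySem.Set.nodup_ofList (row.map (pvPre l))).count]
  simp [PySem.Set.mem_ofList]

-- ---- B's outer loop ----
lemma pvB_run (l : Int) (rows : List (List String)) : ∀ (d : PySem.Dict String Int),
    d.keys.Nodup →
    (rows.foldl (pvStepB l) d).keys =
      rows.foldl (fun s row => PySem.Set.update s (row.map (pvPre l))) d.keys ∧
    ∀ v, (rows.foldl (pvStepB l) d).getD v 0 =
      d.getD v 0 + (rows.countP (fun row => decide (v ∈ row.map (pvPre l))) : Int) := by
  induction rows with
  | nil => intro d hnd; simp
  | cons row rest ih =>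
    intro d hnd
    have hk := pvStepB_keys l d row
    have hnd' : (pvStepB l d row).keys.Nodup := by
      rw [hk]; exact PySem.Set.nodup_update _ _ hnd
    obtain ⟨ihk, ihg⟩ := ih (pvStepB l d row) hnd'
    constructor
    · rw [List.foldl_cons, ihk, hk, List.foldl_cons]
    · intro v
      rw [List.foldl_cons, ihg v, pvStepB_getD l d row v, List.countP_cons]
      by_cases h : v ∈ row.map (pvPre l) <;> · push_cast; simp [h]; try ring

-- ---- the common canonical form ----
lemma pvKeys_eq_fold_update (l : Int) (T : List (List String)) :
    T.foldl (fun s row => PySem.Set.update s (row.map (pvPre l))) [] = pvKeys l T := by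
  unfold pvKeys
  congr 1
  funext s row
  simp [PySem.Set.update, List.foldl_map]

lemma pvA_items_eq (l : Int) (T : List (List String)) :
    get_large_1_itemsets T l =
      (pvKeys l T).map (fun k =>
        (k, (T.countP (fun row => decide (k ∈ row.map (pvPre l))) : Int))) := by
  have hitems : T.foldl (fun acc row =>
      row.foldl (fun acc item =>
        if PySem.Str.slice item (some 0) (some l) ∈ acc then acc
        else acc ++ [PySem.Str.slice item (some 0) (some l)]) acc) [] = pvKeys l T := by
    unfold pvKeys
    congr 1
    funext acc row
    congr 1
    funext acc item
    rw [PySem.Set.add_eq_ite]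
    rfl
  have hA : get_large_1_itemsets T l =
      ((PySem.List.enumerate T 0).foldl (fun d p =>
          (d.keys).foldl (fun d' k =>
            if k ∈ p.2.foldl (fun acc item => acc ++ [PySem.Str.slice item (some 0) (some l)]) []
            then d'.modify k 0 (· + 1) else d') d)
        ((T.foldl (fun acc row =>
            row.foldl (fun acc item =>
              if PySem.Str.slice item (some 0) (some l) ∈ acc then acc
              else acc ++ [PySem.Str.slice item (some 0) (some l)]) acc) []).foldl
          (fun d k => d.insert k 0) PySem.Dict.empty)).items := rfl
  rw [hA, hitems]
  set d0 := (pvKeys l T).foldl (fun d k => d.insert k 0) (PySem.Dict.empty : PySem.Dict String Int) with hd0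
  have hkeys0 : d0.keys = pvKeys l T := by
    rw [hd0, PySem.Dict.keys_foldl_insert _ (fun _ _ => 0)]
    have he : (PySem.Dict.empty : PySem.Dict String Int).keys = [] := by
      simp [PySem.Dict.empty, PySem.Dict.keys]
    rw [he, pvUpdate_fresh _ _ (by simp) (pvKeys_nodup l T)]
    simp
  have hnd0 : d0.keys.Nodup := by rw [hkeys0]; exact pvKeys_nodup l T
  have hget0 : ∀ v, d0.getD v 0 = 0 := by
    rw [hd0]
    exact pvGetD_insert0 _ _ (fun v => by simp [PySem.Dict.empty, PySem.Dict.getD, PySem.Dict.get?])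
  have henum : (PySem.List.enumerate T 0).foldl (fun d p =>
      (d.keys).foldl (fun d' k =>
        if k ∈ p.2.foldl (fun acc item => acc ++ [PySem.Str.slice item (some 0) (some l)]) []
        then d'.modify k 0 (· + 1) else d') d) d0
      = T.foldl (pvStepA l) d0 := by
    conv_rhs => rw [← PySem.List.map_snd_enumerate T 0]
    rw [List.foldl_map]
    rfl
  rw [henum]
  obtain ⟨hk, hg⟩ := pvA_run l T d0 hnd0
  rw [PySem.Dict.items_eq_map_keys _ (by rw [hk]; exact hnd0) 0, hk, hkeys0]
  apply List.map_congr_left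
  intro k hkmem
  rw [hg k (by rw [hkeys0]; exact hkmem), hget0 k]
  simp

lemma pvB_items_eq (l : Int) (T : List (List String)) :
    get_large_1_itemsets_alt T l =
      (pvKeys l T).map (fun k =>
        (k, (T.countP (fun row => decide (k ∈ row.map (pvPre l))) : Int))) := by
  have hB : get_large_1_itemsets_alt T l = (T.foldl (pvStepB l) PySem.Dict.empty).items := rfl
  rw [hB]
  have hke : (PySem.Dict.empty : PySem.Dict String Int).keys = [] := by
    simp [PySem.Dict.empty, PySem.Dict.keys]
  obtain ⟨hk, hg⟩ := pvB_run l T (PySem.Dict.empty : PySem.Dict String Int) (by rw [hke]; simp)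
  have hkeys : (T.foldl (pvStepB l) PySem.Dict.empty).keys = pvKeys l T := by
    rw [hk, hke, pvKeys_eq_fold_update]
  rw [PySem.Dict.items_eq_map_keys _ (by rw [hkeys]; exact pvKeys_nodup l T) 0, hkeys]
  apply List.map_congr_left
  intro k _
  rw [hg k]
  simp [PySem.Dict.empty, PySem.Dict.getD, PySem.Dict.get?]

-- ===== VERDICT (by name: the statement is the Claim_ definition above) =====
theorem get_large_1_itemsets_spec : Claim_equal_get_large_1_itemsets := by
  intro T l _
  unfold Spec_get_large_1_itemsets
  rw [pvA_items_eq, pvB_items_eq]
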